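-- pv_equiv track=rewrite | github.com/Criadocf/SEMANA-15 | 01.py | larger_colum_position
-- ===== SOURCE A (Python) =====
-- def larger_colum_position(n):
--   larger_colum = []
--   larger = -99999
--   for c in range(len(n)):
--     for g in n[c]:
--       if g > larger:
--         larger = g
--         position = n[c].index(g)
--   larger_colum.append(position)
--   return tuple(larger_colum)
-- ===== SOURCE B (Python) =====
-- def larger_colum_position(n):
--     m = max(g for row in n for g in row)
--     r = next(row for row in n if m in row)
--     return (r.index(m),)
-- ===== Notes on version B (the rewrite author's own statement) =====
-- stated objective: simpler
-- what changed: B drops A's running-max-with-unbound-position loop entirely: it computes the global maximum of the flattened matrix in one pass, then finds the first row containing it and returns that row's first index of it (two staged passes instead of a stateful nested scan with an index call at every new record).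
import Mathlib
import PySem

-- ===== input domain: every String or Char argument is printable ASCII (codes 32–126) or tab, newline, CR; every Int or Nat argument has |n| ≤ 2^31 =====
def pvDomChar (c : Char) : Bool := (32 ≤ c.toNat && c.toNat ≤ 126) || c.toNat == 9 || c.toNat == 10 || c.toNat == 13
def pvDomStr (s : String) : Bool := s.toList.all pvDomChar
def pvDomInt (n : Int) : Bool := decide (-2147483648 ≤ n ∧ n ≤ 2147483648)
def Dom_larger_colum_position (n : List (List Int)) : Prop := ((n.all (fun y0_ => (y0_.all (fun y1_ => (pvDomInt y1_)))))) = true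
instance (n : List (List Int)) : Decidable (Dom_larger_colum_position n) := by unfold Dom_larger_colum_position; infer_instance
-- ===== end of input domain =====

-- B replaces A's stateful nested scan by two staged passes: global max of the flattened
-- matrix, then first index of it in the first row containing it (simpler, not claimed faster).

-- ===== PORT A =====
-- state = (larger, position); position starts unbound (Python NameError) = none here
def larger_colum_position (n : List (List Int)) : List Int :=
  let st := (PySem.List.pyRange 0 (n.length : Int) 1).foldl
    (fun (st : Int × Option Nat) c =>
      let row := PySem.List.pyGetD n c []
      row.foldl (fun st g =>
        if g > st.1 then (g, PySem.List.index? row g) else st) st)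
    ((-99999 : Int), (none : Option Nat))
  match st.2 with
  | some p => [(p : Int)]
  | none => []     -- Python raises NameError here; excluded by Pre_

-- ===== PORT B =====
def larger_colum_position_alt (n : List (List Int)) : List Int :=
  match PySem.List.max? n.flatten (fun x => x) with       -- max(g for row in n for g in row)
  | none => []                                            -- Python ValueError; excluded by Pre_
  | some m =>
    match n.find? (fun row => decide (m ∈ row)) with      -- next(row for row in n if m in row)
    | none => []                                          -- unreachable: m ∈ some row
    | some r =>
      match PySem.List.index? r m with                    -- r.index(m)
      | some i => [(i : Int)]
      | none => []                                        -- unreachable: m ∈ r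

-- ===== PRECONDITION & SPEC =====
-- Pre_ excludes exactly the inputs where Python A raises NameError (position never bound):
-- no element anywhere exceeds the -99999 sentinel.
def Pre_larger_colum_position (n : List (List Int)) : Prop :=
  ∃ row ∈ n, ∃ x ∈ row, (-99999 : Int) < x
instance (n : List (List Int)) : Decidable (Pre_larger_colum_position n) := by
  unfold Pre_larger_colum_position; infer_instance
def pvWitness_larger_colum_position : List (List Int) := [[1]]

def Spec_larger_colum_position (n : List (List Int)) (out : List Int) : Prop := out = larger_colum_position_alt n
instance (n : List (List Int)) (out : List Int) : Decidable (Spec_larger_colum_position n out) := by unfold Spec_larger_colum_position; infer_instance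

-- ===== CLAIM (what is proved, stated in full; the proofs are below) =====
def Claim_equal_larger_colum_position : Prop := ∀ (n : List (List Int)), Dom_larger_colum_position n → Pre_larger_colum_position n → Spec_larger_colum_position n (larger_colum_position n)

-- ===== LEMMAS AND PROOFS =====

-- every member of xs is ≤ the fold of max
theorem pv_mem_le_foldl_max (xs : List Int) (l y : Int) (hy : y ∈ xs) :
    y ≤ xs.foldl max l := by
  induction xs generalizing l with
  | nil => cases hy
  | cons x xs ih =>
    rcases List.mem_cons.mp hy with h | h
    · subst h
      exact le_trans (le_max_right l y) (PySem.List.le_foldl_max xs (max l y)).1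
    · exact ih (max l x) h

-- the fold of max is the seed or a member
theorem pv_foldl_max_cases (xs : List Int) (l : Int) :
    xs.foldl max l = l ∨ xs.foldl max l ∈ xs := by
  induction xs generalizing l with
  | nil => exact Or.inl rfl
  | cons x xs ih =>
    rcases ih (max l x) with h | h
    · rw [List.foldl_cons, h]
      rcases max_cases l x with ⟨h1, _⟩ | ⟨h1, _⟩
      · exact Or.inl h1
      · exact Or.inr (by rw [h1]; exact List.mem_cons_self)
    · exact Or.inr (List.mem_cons_of_mem _ h)

-- A's inner loop over t (index? taken in the fixed row) in closed form
theorem pv_innerA (row t : List Int) (l : Int) (p : Option Nat) :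
    t.foldl (fun (st : Int × Option Nat) g =>
        if g > st.1 then (g, PySem.List.index? row g) else st) (l, p)
      = (t.foldl max l,
         if l < t.foldl max l then PySem.List.index? row (t.foldl max l) else p) := by
  induction t generalizing l p with
  | nil => simp
  | cons g t ih =>
    simp only [List.foldl_cons]
    by_cases hg : l < g
    · rw [if_pos hg, ih, max_eq_right (le_of_lt hg)]
      have hgM : g ≤ t.foldl max g := (PySem.List.le_foldl_max t g).1
      rw [if_pos (lt_of_lt_of_le hg hgM)]
      by_cases h2 : g < t.foldl max g
      · rw [if_pos h2]
      · rw [if_neg h2]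
        have : t.foldl max g = g := le_antisymm (not_lt.mp h2) hgM
        rw [this]
    · rw [if_neg hg, ih, max_eq_left (not_lt.mp hg)]

-- A's whole row loop in closed form: running max of the flattened matrix, and the
-- position taken (if the seed was beaten) in the FIRST row containing the final max.
theorem pv_outerA (n : List (List Int)) (l : Int) (p : Option Nat) :
    n.foldl (fun (st : Int × Option Nat) row =>
        row.foldl (fun st g => if g > st.1 then (g, PySem.List.index? row g) else st) st)
      (l, p)
      = (n.flatten.foldl max l,
         if l < n.flatten.foldl max l then
           (match n.find? (fun row => decide (n.flatten.foldl max l ∈ row)) with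
            | some r => PySem.List.index? r (n.flatten.foldl max l)
            | none => p)
         else p) := by
  induction n generalizing l p with
  | nil => simp
  | cons row rest ih =>
    simp only [List.foldl_cons, List.flatten_cons, List.foldl_append]
    rw [pv_innerA row row l p, ih]
    set M₁ := row.foldl max l with hM₁
    set F := rest.flatten.foldl max M₁ with hF
    have hlM₁ : l ≤ M₁ := (PySem.List.le_foldl_max row l).1
    have hM₁F : M₁ ≤ F := (PySem.List.le_foldl_max rest.flatten M₁).1
    by_cases hMF : M₁ < F
    · -- final max comes after this row: F ∉ row, find? skips it
      have hnotin : F ∉ row := fun hmem =>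
        absurd (pv_mem_le_foldl_max row l F hmem) (not_le.mpr hMF)
      have hfind : (row :: rest).find? (fun r => decide (F ∈ r))
          = rest.find? (fun r => decide (F ∈ r)) := by
        rw [List.find?_cons_of_neg]; simpa using hnotin
      have hFfl : F ∈ rest.flatten := by
        rcases pv_foldl_max_cases rest.flatten M₁ with h | h
        · exact absurd h.symm (ne_of_lt hMF)
        · exact h
      obtain ⟨r₂, hr₂, hFr₂⟩ := List.mem_flatten.mp hFfl
      obtain ⟨r₃, hfr⟩ : ∃ r₃, rest.find? (fun r => decide (F ∈ r)) = some r₃ := by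
        rcases h : rest.find? (fun r => decide (F ∈ r)) with _ | r₃
        · have := List.find?_eq_none.mp h r₂ hr₂
          simp [hFr₂] at this
        · exact ⟨r₃, rfl⟩
      rw [if_pos hMF, if_pos (lt_of_le_of_lt hlM₁ hMF), hfind, hfr]
    · -- final max already reached in this row (or the seed): F = M₁
      have hFeq : F = M₁ := le_antisymm (not_lt.mp hMF) hM₁F
      rw [if_neg hMF, hFeq]
      by_cases hlM : l < M₁
      · -- M₁ beats the seed, hence M₁ ∈ row: find? returns row itself
        have hmem : M₁ ∈ row := by
          rcases pv_foldl_max_cases row l with h | h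
          · exact absurd h.symm (ne_of_lt hlM)
          · exact h
        have hfind : (row :: rest).find? (fun r => decide (M₁ ∈ r)) = some row := by
          rw [List.find?_cons_of_pos]; simpa using hmem
        rw [if_pos hlM, if_pos hlM, hfind]
      · have hMl : M₁ = l := le_antisymm (not_lt.mp hlM) hlM₁
        rw [if_neg hlM, hMl, if_neg (lt_irrefl l)]

-- the fold of max equals max of seed and the list maximum
theorem pv_foldl_max_eq (xs : List Int) (m l : Int)
    (hm : PySem.List.max? xs (fun x => x) = some m) :
    xs.foldl max l = max l m := by
  have hmem : m ∈ xs := PySem.List.max?_mem hm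
  have hmax : ∀ y ∈ xs, y ≤ m := fun y hy => PySem.List.max?_isMax hm y hy
  apply le_antisymm
  · rcases pv_foldl_max_cases xs l with h | h
    · rw [h]; exact le_max_left l m
    · exact le_trans (hmax _ h) (le_max_right l m)
  · exact max_le (PySem.List.le_foldl_max xs l).1 (pv_mem_le_foldl_max xs l m hmem)

-- ===== VERDICT (by name: the statement is the Claim_ definition above) =====
theorem larger_colum_position_spec : Claim_equal_larger_colum_position := by
  intro n _ hpre
  obtain ⟨row, hrow, x, hx, hxgt⟩ := hpre
  have hxfl : x ∈ n.flatten := List.mem_flatten.mpr ⟨row, hrow, hx⟩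
  obtain ⟨m, hm⟩ : ∃ m, PySem.List.max? n.flatten (fun y => y) = some m := by
    rcases h : PySem.List.max? n.flatten (fun y => y) with _ | m
    · exact absurd ((PySem.List.max?_eq_none_iff _ _).mp h)
        (by intro he; rw [he] at hxfl; cases hxfl)
    · exact ⟨m, rfl⟩
  have hxm : x ≤ m := PySem.List.max?_isMax hm x hxfl
  have hFm : n.flatten.foldl max (-99999) = m := by
    rw [pv_foldl_max_eq n.flatten m (-99999) hm]
    exact max_eq_right (le_of_lt (lt_of_lt_of_le hxgt hxm))
  have hlt : (-99999 : Int) < n.flatten.foldl max (-99999) := by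
    rw [hFm]; exact lt_of_lt_of_le hxgt hxm
  unfold Spec_larger_colum_position larger_colum_position larger_colum_position_alt
  rw [PySem.List.foldl_pyRange_zero_pyGetD' n ([] : List Int)
    (fun (st : Int × Option Nat) row =>
      row.foldl (fun st g => if g > st.1 then (g, PySem.List.index? row g) else st) st)]
  rw [pv_outerA n (-99999) none, if_pos hlt, hFm, hm]
  have hmfl : m ∈ n.flatten := PySem.List.max?_mem hm
  obtain ⟨r, hrn, hmr⟩ := List.mem_flatten.mp hmfl
  obtain ⟨r', hfind⟩ : ∃ r', n.find? (fun row => decide (m ∈ row)) = some r' := by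
    rcases h : n.find? (fun row => decide (m ∈ row)) with _ | r'
    · have := List.find?_eq_none.mp h r hrn
      simp [hmr] at this
    · exact ⟨r', rfl⟩
  simp [hfind]
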